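-- pv_equiv track=rewrite | github.com/agchen92/USBirths | USBirths.py | maxmin_dict
-- ===== SOURCE A (Python) =====
-- def maxmin_dict (dictionary):
--     maxmin_result={}
--     min=None
--     max=None
--     v_list=list(dictionary.values())
--     for item in v_list:
--         if max is None or item>max:
--             max=item
--         if min is None or item<min:
--             min=item
--     maxmin_result['Max']=max
--     maxmin_result['Min']=min
--     return maxmin_result
-- ===== SOURCE B (Python) =====
-- def maxmin_dict(dictionary):
--     values = sorted(dictionary.values())
--     if not values:
--         return {'Max': None, 'Min': None}
--     return {'Max': values[-1], 'Min': values[0]}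
-- ===== Notes on version B (the rewrite author's own statement) =====
-- stated objective: simpler
-- what changed: Replaces A's manual single-pass min/max scan with two Option sentinels by sorting the values once and reading the first and last elements.
import Mathlib
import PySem

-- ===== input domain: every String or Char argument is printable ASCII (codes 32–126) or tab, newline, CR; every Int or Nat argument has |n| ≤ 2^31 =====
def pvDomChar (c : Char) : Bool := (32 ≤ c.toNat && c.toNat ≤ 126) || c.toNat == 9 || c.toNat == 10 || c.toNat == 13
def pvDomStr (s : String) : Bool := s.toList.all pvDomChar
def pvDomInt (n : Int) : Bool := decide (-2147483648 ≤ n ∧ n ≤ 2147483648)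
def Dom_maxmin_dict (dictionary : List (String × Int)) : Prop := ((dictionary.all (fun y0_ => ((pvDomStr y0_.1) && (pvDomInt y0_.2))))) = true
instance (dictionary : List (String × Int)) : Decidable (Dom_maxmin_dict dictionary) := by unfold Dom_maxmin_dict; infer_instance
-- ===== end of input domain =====

-- B sorts the values once and reads the ends instead of A's manual single-pass min/max scan; return-value equivalence only.

-- ===== PORT A =====
-- one loop step of A: update the running max, then the running min
def maxminStep (acc : Option Int × Option Int) (item : Int) : Option Int × Option Int :=
  let mx := match acc.1 with
    | none => some item
    | some m => if item > m then some item else some m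
  let mn := match acc.2 with
    | none => some item
    | some m => if item < m then some item else some m
  (mx, mn)

def maxmin_dict (dictionary : List (String × Int)) : List (String × Option Int) :=
  let v_list := (PySem.Dict.ofList dictionary).values
  let r := v_list.foldl maxminStep (none, none)
  [("Max", r.1), ("Min", r.2)]

-- ===== PORT B =====
def maxmin_dict_alt (dictionary : List (String × Int)) : List (String × Option Int) :=
  let values := PySem.List.sorted ((PySem.Dict.ofList dictionary).values) (fun x => x) false
  match values with
  | [] => [("Max", none), ("Min", none)]
  | v :: rest => [("Max", some ((v :: rest).getLast (List.cons_ne_nil v rest))), ("Min", some v)]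

-- ===== PRECONDITION & SPEC =====
def Spec_maxmin_dict (dictionary : List (String × Int)) (out : List (String × Option Int)) : Prop := out = maxmin_dict_alt dictionary
instance (dictionary : List (String × Int)) (out : List (String × Option Int)) : Decidable (Spec_maxmin_dict dictionary out) := by unfold Spec_maxmin_dict; infer_instance

-- ===== CLAIM (what is proved, stated in full; the proofs are below) =====
def Claim_equal_maxmin_dict : Prop := ∀ (dictionary : List (String × Int)), Dom_maxmin_dict dictionary → Spec_maxmin_dict dictionary (maxmin_dict dictionary)

-- ===== LEMMAS AND PROOFS =====

theorem foldA_some (t : List Int) (a b : Int) :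
    t.foldl maxminStep (some a, some b) = (some (t.foldl max a), some (t.foldl min b)) := by
  induction t generalizing a b with
  | nil => rfl
  | cons x t ih =>
    simp only [List.foldl_cons]
    have h1 : maxminStep (some a, some b) x = (some (max a x), some (min b x)) := by
      simp only [maxminStep, Prod.mk.injEq]
      refine ⟨?_, ?_⟩ <;> split_ifs with h <;> simp [max_def, min_def] <;> omega
    rw [h1, ih]

theorem foldA_none (v : Int) (t : List Int) :
    (v :: t).foldl maxminStep (none, none) = (some (t.foldl max v), some (t.foldl min v)) := by
  simp only [List.foldl_cons]
  have : maxminStep (none, none) v = (some v, some v) := rfl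
  rw [this, foldA_some]

theorem foldl_max_mem (t : List Int) (v : Int) : t.foldl max v ∈ v :: t := by
  induction t generalizing v with
  | nil => simp
  | cons x t ih =>
    simp only [List.foldl_cons]
    rcases List.mem_cons.1 (ih (max v x)) with h | h
    · rcases max_choice v x with h' | h' <;> rw [h, h'] <;> simp
    · simp [h]

theorem le_foldl_max (t : List Int) (v : Int) : ∀ x ∈ v :: t, x ≤ t.foldl max v := by
  induction t generalizing v with
  | nil => intro x hx; simp only [List.foldl_nil]; simp at hx; omega
  | cons y t ih =>
    intro x hx
    simp only [List.foldl_cons]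
    simp only [List.mem_cons] at hx
    rcases hx with rfl | rfl | h
    · exact le_trans (le_max_left x y) (ih (max x y) _ (by simp))
    · exact le_trans (le_max_right v x) (ih (max v x) _ (by simp))
    · exact ih (max v y) x (by simp [h])

theorem foldl_min_mem (t : List Int) (v : Int) : t.foldl min v ∈ v :: t := by
  induction t generalizing v with
  | nil => simp
  | cons x t ih =>
    simp only [List.foldl_cons]
    rcases List.mem_cons.1 (ih (min v x)) with h | h
    · rcases min_choice v x with h' | h' <;> rw [h, h'] <;> simp
    · simp [h]

theorem foldl_min_le (t : List Int) (v : Int) : ∀ x ∈ v :: t, t.foldl min v ≤ x := by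
  induction t generalizing v with
  | nil => intro x hx; simp only [List.foldl_nil]; simp at hx; omega
  | cons y t ih =>
    intro x hx
    simp only [List.foldl_cons]
    simp only [List.mem_cons] at hx
    rcases hx with rfl | rfl | h
    · exact le_trans (ih (min x y) _ (by simp)) (min_le_left x y)
    · exact le_trans (ih (min v x) _ (by simp)) (min_le_right v x)
    · exact ih (min v y) x (by simp [h])

theorem pairwise_le_getLast (l : List Int) (h : l ≠ []) (hp : l.Pairwise (· ≤ ·)) :
    ∀ x ∈ l, x ≤ l.getLast h := by
  induction l with
  | nil => exact absurd rfl h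
  | cons a t ih =>
    intro x hx
    cases t with
    | nil => simp at hx; simp [hx]
    | cons b t' =>
      have hp' := (List.pairwise_cons.1 hp).2
      have ha := (List.pairwise_cons.1 hp).1
      rw [List.getLast_cons (by simp)]
      rcases List.mem_cons.1 hx with h' | h'
      · subst h'
        exact le_trans (ha _ (List.getLast_mem _)) (le_refl _)
      · exact ih (by simp) hp' x h'

-- the core statement about an arbitrary value list
theorem core (vals : List Int) :
    (match vals.foldl maxminStep ((none : Option Int), (none : Option Int)) with
      | r => [("Max", r.1), ("Min", r.2)] : List (String × Option Int)) =
    (match PySem.List.sorted vals (fun x => x) false with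
      | [] => [("Max", none), ("Min", none)]
      | v :: rest => [("Max", some ((v :: rest).getLast (List.cons_ne_nil v rest))), ("Min", some v)]) := by
  cases hv : vals with
  | nil => simp [PySem.List.sorted]
  | cons v t =>
    rw [foldA_none]
    have hs : PySem.List.sorted (v :: t) (fun x => x) false ≠ [] := by
      intro h
      exact (List.cons_ne_nil v t) ((PySem.List.sorted_eq_nil_iff _ _ _).1 h)
    cases hss : PySem.List.sorted (v :: t) (fun x => x) false with
    | nil => exact absurd hss hs
    | cons m rest =>
      have hperm : (PySem.List.sorted (v :: t) (fun x => x) false).Perm (v :: t) :=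
        PySem.List.sorted_perm _ _ _
      rw [hss] at hperm
      -- min : head m of sorted
      have hmin1 : ∀ y ∈ (v :: t), m ≤ y := by
        intro y hy
        have := PySem.List.key_head_sorted_le (xs := v :: t) (key := fun x => x) hss
        exact this y hy
      have hm_mem : m ∈ (v :: t) := hperm.mem_iff.1 (by simp)
      have hmin : t.foldl min v = m :=
        le_antisymm (foldl_min_le t v m hm_mem) (hmin1 _ (foldl_min_mem t v))
      -- max : last of sorted
      have hpw : (m :: rest).Pairwise (fun a b => a ≤ b) := by
        have := PySem.List.sorted_pairwise (xs := v :: t) (key := fun x => x)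
        rwa [hss] at this
      have hlast_mem : (m :: rest).getLast (List.cons_ne_nil m rest) ∈ (v :: t) :=
        hperm.mem_iff.1 (List.getLast_mem _)
      have hmax : t.foldl max v = (m :: rest).getLast (List.cons_ne_nil m rest) := by
        apply le_antisymm
        · have hf : t.foldl max v ∈ (m :: rest) := hperm.mem_iff.2 (foldl_max_mem t v)
          exact pairwise_le_getLast _ _ hpw _ hf
        · exact le_foldl_max t v _ hlast_mem
      simp [hmin, hmax]

-- ===== VERDICT (by name: the statement is the Claim_ definition above) =====
theorem maxmin_dict_spec : Claim_equal_maxmin_dict := by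
  intro d _
  unfold Spec_maxmin_dict maxmin_dict maxmin_dict_alt
  exact core ((PySem.Dict.ofList d).values)
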